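-- pv_equiv track=rewrite | github.com/CongyangY/UniGapClose | GapCounter.py | count_n_and_gaps
-- ===== SOURCE A (Python) =====
-- def count_n_and_gaps(sequence):
--     n_count = sequence.count('N')
--     gap_count = 0
--     i = 0
--     while i < len(sequence):
--         if sequence[i] == 'N':
--             gap_count += 1
--             while i < len(sequence) and sequence[i] == 'N':
--                 i += 1
--         else:
--             i += 1
--     return n_count, gap_count
-- ===== SOURCE B (Python) =====
-- def count_n_and_gaps(sequence):
--     # Split on 'N': the string has count('N') separators, so len(parts)-1 N's;
--     # each adjacent pair of N's yields one empty interior part, so the number of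
--     # N-runs is the N count minus the interior empty-part count.
--     parts = sequence.split('N')
--     n_count = len(parts) - 1
--     gap_count = n_count - parts[1:-1].count('')
--     return n_count, gap_count
-- ===== Notes on version B (the rewrite author's own statement) =====
-- stated objective: faster
-- what changed: Replaces A's index-based while loop with an inner run-skipping loop by splitting the string on the gap character once: n_count = len(parts)-1 and gap_count = n_count minus the count of empty interior parts (each adjacent pair of gap characters contributes exactly one).
import Mathlib
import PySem

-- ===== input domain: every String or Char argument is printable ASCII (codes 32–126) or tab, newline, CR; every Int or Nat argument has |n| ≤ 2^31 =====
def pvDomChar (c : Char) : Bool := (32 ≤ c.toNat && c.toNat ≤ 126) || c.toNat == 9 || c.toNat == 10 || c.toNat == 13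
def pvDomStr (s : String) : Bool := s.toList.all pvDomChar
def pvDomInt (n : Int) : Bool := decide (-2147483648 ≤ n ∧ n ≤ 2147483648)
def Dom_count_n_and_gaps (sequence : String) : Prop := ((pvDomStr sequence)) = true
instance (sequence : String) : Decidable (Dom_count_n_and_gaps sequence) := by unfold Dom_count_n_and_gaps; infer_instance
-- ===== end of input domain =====

-- B replaces A's index-based scan (with an inner run-skipping loop) by splitting the
-- string on 'N' and counting pieces: n_count = len(parts)-1, gap_count = n_count minus
-- the interior empty pieces (one per adjacent NN pair). (objective: alternative)

-- ===== PORT A =====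
-- inner while: 'while i < len(sequence) and sequence[i] == 'N': i += 1' — skips the run of 'N's
def pvASkipN : List Char → List Char
  | [] => []
  | c :: rest => if c == 'N' then pvASkipN rest else c :: rest

theorem pvASkipN_length_le (cs : List Char) : (pvASkipN cs).length ≤ cs.length := by
  induction cs with
  | nil => simp [pvASkipN]
  | cons c rest ih => simp only [pvASkipN]; split <;> simp <;> omega

-- outer while over the suffix of the string starting at i
def pvALoop : List Char → Int → Int
  | [], gap => gap
  | c :: rest, gap =>
    if c == 'N' then
      pvALoop (pvASkipN rest) (gap + 1)
    else
      pvALoop rest gap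
termination_by cs _ => cs.length
decreasing_by
  · have := pvASkipN_length_le rest; simp; omega
  · simp

def count_n_and_gaps (sequence : String) : Int × Int :=
  let n_count : Int := (PySem.Str.count sequence "N" : Int)
  let gap_count := pvALoop sequence.toList 0
  (n_count, gap_count)

-- ===== PORT B =====
-- parts = sequence.split('N'): single-char-separator str.split is List.splitOn on the chars
def count_n_and_gaps_alt (sequence : String) : Int × Int :=
  let parts : List (List Char) := sequence.toList.splitOn 'N'
  let n_count : Int := (parts.length : Int) - 1
  let gap_count : Int := n_count - ((PySem.List.slice parts (some 1) (some (-1))).count [] : Int)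
  (n_count, gap_count)

-- ===== PRECONDITION & SPEC =====
def Spec_count_n_and_gaps (sequence : String) (out : Int × Int) : Prop := out = count_n_and_gaps_alt sequence
instance (sequence : String) (out : Int × Int) : Decidable (Spec_count_n_and_gaps sequence out) := by unfold Spec_count_n_and_gaps; infer_instance

-- ===== CLAIM (what is proved, stated in full; the proofs are below) =====
def Claim_equal_count_n_and_gaps : Prop := ∀ (sequence : String), Dom_count_n_and_gaps sequence → Spec_count_n_and_gaps sequence (count_n_and_gaps sequence)

-- ===== LEMMAS AND PROOFS =====

-- number of maximal runs of 'N' (proof-side characterisation of both gap counts)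
def pvRuns : List Char → Nat
  | [] => 0
  | c :: rest =>
    if c = 'N' then 1 + pvRuns (rest.dropWhile (· == 'N')) else pvRuns rest
termination_by cs => cs.length
decreasing_by
  · have := List.length_dropWhile_le (· == 'N') rest; simp; omega
  · simp

-- interior empty-part count of the splitOn decomposition
def pvE (l : List Char) : Nat :=
  (((l.splitOnP (· == 'N')).drop 1).dropLast).count []

theorem pvASkipN_eq_dropWhile (cs : List Char) : pvASkipN cs = cs.dropWhile (· == 'N') := by
  induction cs with
  | nil => rfl
  | cons c rest ih => by_cases h : c = 'N' <;> simp [pvASkipN, List.dropWhile_cons, h, ih]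

theorem pvMain (cs : List Char) (gap : Int) : pvALoop cs gap = gap + (pvRuns cs : Int) := by
  induction cs, gap using pvALoop.induct with
  | case1 gap => simp [pvALoop, pvRuns]
  | case2 c rest gap hc ih =>
    have hc' : c = 'N' := by simpa using hc
    subst hc'
    rw [pvALoop, if_pos hc, ih, pvASkipN_eq_dropWhile]
    simp [pvRuns]; push_cast; ring
  | case3 c rest gap hc ih =>
    have hc' : ¬ c = 'N' := by simpa using hc
    rw [pvALoop, if_neg hc, ih]
    simp [pvRuns, hc']

-- count 'N' via PySem.Chars.count equals List.count
theorem pvCountGo (fuel : Nat) (l : List Char) (acc : Nat) (h : l.length ≤ fuel) :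
    PySem.Chars.count.go ['N'] fuel l acc = acc + l.count 'N' := by
  induction fuel generalizing l acc with
  | zero =>
    have : l = [] := by cases l <;> simp_all
    subst this; simp [PySem.Chars.count.go]
  | succ n ih =>
    cases l with
    | nil => simp [PySem.Chars.count.go]
    | cons c t =>
      have ht : t.length ≤ n := by simpa using h
      by_cases hc : c = 'N'
      · subst hc
        rw [PySem.Chars.count.go]
        simp only [List.isPrefixOf, List.length]
        rw [if_pos (by simp), ih _ _ (by simpa using ht)]
        simp [List.count_cons]
        omega
      · rw [PySem.Chars.count.go]
        rw [if_neg (by simp [List.isPrefixOf]; exact fun h => hc h.symm), ih _ _ ht]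
        simp [List.count_cons, hc]

theorem pvCountEq (l : List Char) : PySem.Chars.count l ['N'] = l.count 'N' := by
  simp [PySem.Chars.count, pvCountGo l.length l 0 le_rfl]

-- parts[1:-1] is (parts.drop 1).dropLast
theorem pvSliceInterior {α : Type} (xs : List α) :
    PySem.List.slice xs (some 1) (some (-1)) = (xs.drop 1).dropLast := by
  cases xs with
  | nil => rfl
  | cons x t =>
    simp only [PySem.List.slice]
    have h1 : PySem.List.clampIdx (x :: t).length 1 = 1 := by
      simp [PySem.List.clampIdx]
    have h2 : PySem.List.clampIdx (x :: t).length (-1) = t.length := by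
      simp [PySem.List.clampIdx]
    rw [h1, h2]
    simp [List.dropLast_eq_take]

-- length of splitOnP = countP + 1
theorem pvSplitLen (l : List Char) :
    (l.splitOnP (· == 'N')).length = l.count 'N' + 1 := by
  induction l with
  | nil => simp [List.splitOnP_nil]
  | cons c t ih =>
    rw [List.splitOnP_cons]
    by_cases hc : c = 'N'
    · simp [hc, ih, List.count_cons]
    · simp [hc, ih, List.count_cons]

theorem pvE_cons_ne (c : Char) (t : List Char) (h : ¬ c = 'N') : pvE (c :: t) = pvE t := by
  unfold pvE
  rw [List.splitOnP_cons, if_neg (by simp [h])]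
  cases ht : t.splitOnP (· == 'N') with
  | nil => exact absurd ht (List.splitOnP_ne_nil _ t)
  | cons a rest => simp

theorem pvE_N_notN (t : List Char) (h : t = [] ∨ ∃ c t', t = c :: t' ∧ ¬ c = 'N') :
    pvE ('N' :: t) = pvE t := by
  unfold pvE
  rw [List.splitOnP_cons, if_pos (by simp)]
  rcases h with h | ⟨c, t', rfl, hc⟩
  · subst h; simp [List.splitOnP_nil]
  · rw [List.splitOnP_cons, if_neg (by simp [hc])]
    cases ht : t'.splitOnP (· == 'N') with
    | nil => exact absurd ht (List.splitOnP_ne_nil _ t')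
    | cons a rest =>
      cases rest with
      | nil => simp
      | cons b rs => simp [List.count_cons]

theorem pvE_NN (t : List Char) : pvE ('N' :: 'N' :: t) = 1 + pvE ('N' :: t) := by
  unfold pvE
  rw [List.splitOnP_cons, if_pos (by simp), List.splitOnP_cons, if_pos (by simp)]
  cases ht : t.splitOnP (· == 'N') with
  | nil => exact absurd ht (List.splitOnP_ne_nil _ t)
  | cons a rest => simp [List.count_cons]; omega

-- the key identity: runs + interior empties = N count
theorem pvKey (l : List Char) : pvRuns l + pvE l = l.count 'N' := by
  match l with
  | [] => simp [pvRuns, pvE, List.splitOnP_nil]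
  | [c] =>
    by_cases hc : c = 'N'
    · subst hc
      have h := pvE_N_notN [] (Or.inl rfl)
      simp [pvRuns, List.count_cons] at *
      simp [h, pvE, List.splitOnP_nil]
    · have h := pvE_cons_ne c [] hc
      simp [pvRuns, hc, h, pvE, List.splitOnP_nil, List.count_cons]
  | c :: d :: t =>
    by_cases hc : c = 'N'
    · subst hc
      by_cases hd : d = 'N'
      · subst hd
        have ih := pvKey ('N' :: t)
        have he := pvE_NN t
        have hr : pvRuns ('N' :: 'N' :: t) = pvRuns ('N' :: t) := by
          simp [pvRuns, List.dropWhile_cons]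
        rw [hr, he]
        simp [List.count_cons] at ih ⊢
        omega
      · have ih := pvKey (d :: t)
        have he := pvE_N_notN (d :: t) (Or.inr ⟨d, t, rfl, hd⟩)
        have hr : pvRuns ('N' :: d :: t) = 1 + pvRuns (d :: t) := by
          simp [pvRuns, List.dropWhile_cons, hd]
        rw [hr, he]
        simp [List.count_cons] at ih ⊢
        omega
    · have ih := pvKey (d :: t)
      have he := pvE_cons_ne c (d :: t) hc
      have hr : pvRuns (c :: d :: t) = pvRuns (d :: t) := by simp [pvRuns, hc]
      rw [hr, he, List.count_cons, if_neg (by simp [hc]), ih]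
      omega
termination_by l.length

-- ===== VERDICT (by name: the statement is the Claim_ definition above) =====
theorem count_n_and_gaps_spec : Claim_equal_count_n_and_gaps := by
  intro s _
  unfold Spec_count_n_and_gaps count_n_and_gaps count_n_and_gaps_alt
  have hsplit : s.toList.splitOn 'N' = s.toList.splitOnP (· == 'N') := rfl
  have hcount : PySem.Str.count s "N" = s.toList.count 'N' := by
    show PySem.Chars.count s.toList "N".toList = _
    exact pvCountEq s.toList
  have hkey := pvKey s.toList
  have hlen := pvSplitLen s.toList
  rw [pvMain s.toList 0]
  simp only [hsplit, hcount, pvSliceInterior, hlen]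
  have : ((s.toList.splitOnP (· == 'N')).drop 1).dropLast.count [] = pvE s.toList := rfl
  rw [this]
  simp only [Prod.mk.injEq]
  constructor <;> (push_cast; omega)
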